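-- pv_equiv track=rewrite | github.com/hmalykhan/scrapping | job/scrapper/ncs.py | cleanup_lines
-- ===== SOURCE A (Python) =====
-- from typing import Dict, Iterable, List, Optional, Tuple
--
-- UI_SKIP_EXACT = {
--     "hide",
--     "show",
--     "skip to main content",
--     "skip to results",
--     "skip to results page nav",
--     "menu",
--     "continue",
-- }
--
-- UI_SKIP_PREFIXES = (
--     "save ",
--     "print this job",
--     "share this job",
--     "share this job via email",
--     "report this job",
--     "you will be signed out soon",
-- )
--
-- UI_ACTION_LINES = {
--     "save to favourites",
--     "print this job",
--     "share this job",
--     "share this job via email",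
--     "report this job",
--     "save",
--     "print",
--     "share",
--     "report",
-- }
--
-- APOSTROPHE_FIXES = {
--     "\u2019": "'",  # right single quote
--     "\u2018": "'",  # left single quote
--     "\u201b": "'",  # single high-reversed-9
--     "\u2032": "'",  # prime
-- }
--
-- def _norm_apostrophes(s: str) -> str:
--     if not s:
--         return ""
--     for k, v in APOSTROPHE_FIXES.items():
--         s = s.replace(k, v)
--     return s
--
-- def cleanup_lines(text: str) -> str:
--     """
--     Normalize multi-line blocks and drop obvious UI/action lines.
--     """
--     lines = [ln.strip() for ln in (text or "").splitlines()]
--     out: List[str] = []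
--     for ln in lines:
--         if not ln:
--             if out and out[-1] != "":
--                 out.append("")
--             continue
--
--         low = _norm_apostrophes(ln).strip().lower()
--         if low in UI_SKIP_EXACT:
--             continue
--         if any(low.startswith(p) for p in UI_SKIP_PREFIXES):
--             continue
--         if low in UI_ACTION_LINES:
--             continue
--
--         out.append(ln)
--
--     return "\n".join(out).strip()
-- ===== SOURCE B (Python) =====
-- from typing import List
--
-- UI_SKIP_EXACT = {
--     "hide",
--     "show",
--     "skip to main content",
--     "skip to results",
--     "skip to results page nav",
--     "menu",
--     "continue",
-- }
--
-- UI_SKIP_PREFIXES = (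
--     "save ",
--     "print this job",
--     "share this job",
--     "share this job via email",
--     "report this job",
--     "you will be signed out soon",
-- )
--
-- UI_ACTION_LINES = {
--     "save to favourites",
--     "print this job",
--     "share this job",
--     "share this job via email",
--     "report this job",
--     "save",
--     "print",
--     "share",
--     "report",
-- }
--
-- APOSTROPHE_FIXES = {
--     "\u2019": "'",
--     "\u2018": "'",
--     "\u201b": "'",
--     "\u2032": "'",
-- }
--
-- def _norm_apostrophes(s: str) -> str:
--     if not s:
--         return ""
--     for k, v in APOSTROPHE_FIXES.items():
--         s = s.replace(k, v)
--     return s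
--
-- def _is_ui_line(low: str) -> bool:
--     return (low in UI_SKIP_EXACT
--             or low.startswith(UI_SKIP_PREFIXES)
--             or low in UI_ACTION_LINES)
--
-- def _keep(ln: str) -> bool:
--     return not _is_ui_line(_norm_apostrophes(ln).strip().lower())
--
-- def _blocks(lines: List[str]) -> List[List[str]]:
--     """Split the line list at blank lines into maximal runs of non-blank lines."""
--     blocks: List[List[str]] = []
--     i, n = 0, len(lines)
--     while i < n:
--         if not lines[i]:
--             i += 1
--             continue
--         j = i
--         while j < n and lines[j]:
--             j += 1
--         blocks.append(lines[i:j])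
--         i = j
--     return blocks
--
-- def cleanup_lines(text: str) -> str:
--     """Paragraph view: split into blank-separated blocks, filter UI lines per
--     block, drop emptied blocks, rejoin blocks with one blank line between them."""
--     lines = [ln.strip() for ln in (text or "").splitlines()]
--     paragraphs = ["\n".join(kept)
--                   for blk in _blocks(lines)
--                   if (kept := [ln for ln in blk if _keep(ln)])]
--     return "\n\n".join(paragraphs)
-- ===== Notes on version B (the rewrite author's own statement) =====
-- stated objective: alternative
-- what changed: A's single stateful scan that interleaves UI-line skipping with blank-line bookkeeping (append '' only if out nonempty and last not blank, final strip) is replaced by a paragraph view: split the stripped lines at blank lines into blocks, filter UI lines inside each block, drop blocks that become empty, and join the surviving blocks with one blank line; no blank-collapsing state and no final strip are needed.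
import Mathlib
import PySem

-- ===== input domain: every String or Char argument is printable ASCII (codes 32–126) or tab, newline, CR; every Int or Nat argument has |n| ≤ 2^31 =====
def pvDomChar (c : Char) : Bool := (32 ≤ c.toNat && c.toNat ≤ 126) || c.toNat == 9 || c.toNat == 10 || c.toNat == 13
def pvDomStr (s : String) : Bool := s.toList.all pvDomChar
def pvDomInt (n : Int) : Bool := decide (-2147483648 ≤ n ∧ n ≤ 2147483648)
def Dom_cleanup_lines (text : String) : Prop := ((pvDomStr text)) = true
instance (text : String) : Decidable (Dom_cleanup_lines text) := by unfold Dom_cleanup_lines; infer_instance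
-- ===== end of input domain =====

-- B replaces A's single stateful scan (UI skipping interleaved with blank-line
-- bookkeeping and a final strip) by a paragraph view: split the stripped lines at
-- blank lines into blocks, filter UI lines per block, drop emptied blocks, and
-- join the surviving blocks with one blank line — objective: alternative, same cost.

-- ===== PORT A =====
-- shared module constants
def uiSkipExact : List String :=
  ["hide", "show", "skip to main content", "skip to results",
   "skip to results page nav", "menu", "continue"]

def uiSkipPrefixes : List String :=
  ["save ", "print this job", "share this job", "share this job via email",
   "report this job", "you will be signed out soon"]

def uiActionLines : List String :=
  ["save to favourites", "print this job", "share this job",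
   "share this job via email", "report this job",
   "save", "print", "share", "report"]

def apostropheFixes : List (String × String) :=
  [("\u2019", "'"), ("\u2018", "'"), ("\u201b", "'"), ("\u2032", "'")]

def normApostrophes (s : String) : String :=
  if s = "" then ""
  else apostropheFixes.foldl (fun s kv => PySem.Str.replace s kv.1 kv.2) s

-- the key A compares on: _norm_apostrophes(ln).strip().lower()
def normKey (ln : String) : String :=
  PySem.Str.lower (PySem.Str.strip (normApostrophes ln))

-- body of A's for-loop (one iteration, acting on the accumulator `out`)
def stepA (out : List String) (ln : String) : List String :=
  if ln = "" then
    (if out ≠ [] ∧ out.getLast? ≠ some "" then out ++ [""] else out)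
  else
    if uiSkipExact.contains (normKey ln) then out
    else if uiSkipPrefixes.any (fun p => PySem.Str.startswith (normKey ln) p) then out
    else if uiActionLines.contains (normKey ln) then out
    else out ++ [ln]

def cleanup_lines (text : String) : String :=
  let lines := (PySem.Str.splitlines (if text = "" then "" else text)).map PySem.Str.strip
  let out := lines.foldl stepA []
  PySem.Str.strip (PySem.Str.join "\n" out)

-- ===== PORT B =====
-- Source B's _is_ui_line
def isUiLine (low : String) : Bool :=
  uiSkipExact.contains low
    || uiSkipPrefixes.any (fun p => PySem.Str.startswith low p)
    || uiActionLines.contains low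

-- Source B's _keep
def keepB (ln : String) : Bool := !(isUiLine (normKey ln))

-- one iteration of Source B's _blocks loop: state = (blocks so far, current run)
def blocksStep (st : List (List String) × List String) (ln : String) :
    List (List String) × List String :=
  if ln ≠ "" then (st.1, st.2 ++ [ln])
  else if st.2 ≠ [] then (st.1 ++ [st.2], []) else st

-- Source B's _blocks: maximal runs of non-blank lines
def blocksOf (lines : List String) : List (List String) :=
  let st := lines.foldl blocksStep ([], [])
  if st.2 ≠ [] then st.1 ++ [st.2] else st.1

def cleanup_lines_alt (text : String) : String :=
  let lines := (PySem.Str.splitlines (if text = "" then "" else text)).map PySem.Str.strip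
  let paragraphs := (blocksOf lines).filterMap (fun blk =>
    let kept := blk.filter keepB
    if kept ≠ [] then some (PySem.Str.join "\n" kept) else none)
  PySem.Str.join "\n\n" paragraphs

-- ===== PRECONDITION & SPEC =====
def Spec_cleanup_lines (text : String) (out : String) : Prop := out = cleanup_lines_alt text
instance (text : String) (out : String) : Decidable (Spec_cleanup_lines text out) := by unfold Spec_cleanup_lines; infer_instance

-- ===== CLAIM (what is proved, stated in full; the proofs are below) =====
def Claim_equal_cleanup_lines : Prop := ∀ (text : String), Dom_cleanup_lines text → Spec_cleanup_lines text (cleanup_lines text)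

-- ===== LEMMAS AND PROOFS =====

-- a line that survives Python's .strip(): non-empty and strip-invariant
def GoodStr (l : String) : Prop := l ≠ "" ∧ PySem.Chars.strip l.toList = l.toList

-- the kept non-empty blocks (what B's filterMap keeps, as line lists)
def keptBlocks (bs : List (List String)) : List (List String) :=
  (bs.map (fun b => b.filter keepB)).filter (fun b => !b.isEmpty)

-- A's out-list, reconstructed from blocks: blocks joined by single "" separators
def flat (K : List (List String)) : List String := List.intercalate [""] K

-- the coupling invariant between A's accumulator and B's (blocks, current-run) state
def RelState (out : List String) (bs : List (List String)) (cur : List String) : Prop :=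
  (∀ b ∈ bs, ∀ l ∈ b, GoodStr l) ∧ (∀ l ∈ cur, GoodStr l) ∧
  ((cur.filter keepB ≠ [] ∧ out = flat (keptBlocks bs ++ [cur.filter keepB]))
   ∨ (cur.filter keepB = [] ∧ keptBlocks bs = [] ∧ out = [])
   ∨ (cur.filter keepB = [] ∧ keptBlocks bs ≠ [] ∧ out = flat (keptBlocks bs) ++ [""]))

theorem intercalate_append_ne {α : Type} (sep : List α) (xs ys : List (List α))
    (hx : xs ≠ []) (hy : ys ≠ []) :
    List.intercalate sep (xs ++ ys) =
      List.intercalate sep xs ++ sep ++ List.intercalate sep ys := by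
  induction xs with
  | nil => exact absurd rfl hx
  | cons a xs ih =>
    cases xs with
    | nil =>
      cases ys with
      | nil => exact absurd rfl hy
      | cons y t => simp [List.intercalate]
    | cons b xs' =>
      have := ih (by simp)
      cases ys with
      | nil => exact absurd rfl hy
      | cons y t =>
        simp only [List.cons_append] at this ⊢
        simp [List.intercalate] at this ⊢
        simp [this]

theorem intercalate_head_append {α : Type} (sep : List α) (x : List α) (l : List (List α)) :
    ∃ r, List.intercalate sep (x :: l) = x ++ r := by
  cases l with
  | nil => exact ⟨[], by simp [List.intercalate]⟩
  | cons y t => exact ⟨sep ++ List.intercalate sep (y :: t), by simp [List.intercalate]⟩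

theorem intercalate_last_append {α : Type} (sep : List α) (l : List (List α)) (x : List α) :
    ∃ p, List.intercalate sep (l ++ [x]) = p ++ x := by
  cases l with
  | nil => exact ⟨[], by simp [List.intercalate]⟩
  | cons y t =>
    refine ⟨List.intercalate sep (y :: t) ++ sep, ?_⟩
    rw [intercalate_append_ne sep (y :: t) [x] (by simp) (by simp)]
    simp [List.intercalate]

-- A's loop ignores a UI line
theorem stepA_of_dropped (ln : String) (h1 : ln ≠ "") (h2 : keepB ln = false)
    (out : List String) : stepA out ln = out := by
  unfold keepB at h2
  simp only [Bool.not_eq_false'] at h2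
  unfold isUiLine at h2
  simp only [Bool.or_eq_true] at h2
  unfold stepA
  rw [if_neg h1]
  by_cases c1 : uiSkipExact.contains (normKey ln) = true
  · rw [if_pos c1]
  · rw [if_neg c1]
    by_cases c2 : (uiSkipPrefixes.any fun p => PySem.Str.startswith (normKey ln) p) = true
    · rw [if_pos c2]
    · rw [if_neg c2]
      have c3 : uiActionLines.contains (normKey ln) = true := by
        rcases h2 with (h | h) | h
        · exact absurd h c1
        · exact absurd h c2
        · exact h
      rw [if_pos c3]


-- flat over a snoc: one "" separator unless the prefix is empty
theorem flat_append_singleton (K : List (List String)) (c : List String) :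
    flat (K ++ [c]) = flat K ++ (if K = [] then [] else [""]) ++ c := by
  cases K with
  | nil => simp [flat, List.intercalate]
  | cons b K' =>
    rw [flat, intercalate_append_ne [""] (b :: K') [c] (by simp) (by simp)]
    simp [flat, List.intercalate]

theorem keptBlocks_append_singleton (bs : List (List String)) (c : List String) :
    keptBlocks (bs ++ [c]) =
      keptBlocks bs ++ (if c.filter keepB ≠ [] then [c.filter keepB] else []) := by
  unfold keptBlocks
  rw [List.map_append, List.filter_append]
  simp only [List.map_cons, List.map_nil, List.filter_cons, List.filter_nil]
  by_cases h : c.filter keepB = []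
  · simp [h]
  · simp [h, List.isEmpty_eq_false_iff]

-- A's loop appends a kept non-blank line
theorem stepA_of_kept (ln : String) (h1 : ln ≠ "") (h2 : keepB ln = true)
    (out : List String) : stepA out ln = out ++ [ln] := by
  unfold keepB at h2
  simp only [Bool.not_eq_true'] at h2
  unfold isUiLine at h2
  simp only [Bool.or_eq_false_iff] at h2
  obtain ⟨⟨c1, c2⟩, c3⟩ := h2
  unfold stepA
  rw [if_neg h1, if_neg (by simp only [c1]; decide), if_neg (by simp only [c2]; decide), if_neg (by simp only [c3]; decide)]

theorem good_of_mem_keptBlocks (bs : List (List String))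
    (hbs : ∀ b ∈ bs, ∀ l ∈ b, GoodStr l) (b : List String) (hb : b ∈ keptBlocks bs) :
    b ≠ [] ∧ ∀ l ∈ b, GoodStr l := by
  unfold keptBlocks at hb
  rw [List.mem_filter] at hb
  obtain ⟨hmem, hne⟩ := hb
  rw [List.mem_map] at hmem
  obtain ⟨b0, hb0, rfl⟩ := hmem
  refine ⟨by simpa [List.isEmpty_eq_false_iff] using hne, fun l hl => hbs b0 hb0 l (List.mem_of_mem_filter hl)⟩

-- the last entry of A's out in the "open block" state is a good line
theorem getLast?_flat_append (ks : List (List String)) (c : List String) (hc : c ≠ []) :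
    (flat (ks ++ [c])).getLast? = c.getLast? := by
  obtain ⟨p, hp⟩ := intercalate_last_append ([""] : List String) ks c
  rw [flat, hp, List.getLast?_append]
  cases c with
  | nil => exact absurd rfl hc
  | cons x t =>
    cases hgl : (x :: t).getLast? with
    | none => simp at hgl
    | some a => simp

-- the invariant is preserved by one line
theorem step_inv (ln : String) (hg : ln ≠ "" → GoodStr ln)
    (out : List String) (bs : List (List String)) (cur : List String)
    (h : RelState out bs cur) :
    RelState (stepA out ln) ((blocksStep (bs, cur) ln).1) ((blocksStep (bs, cur) ln).2) := by
  obtain ⟨hbs, hcur, hdisj⟩ := h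
  by_cases hblank : ln = ""
  · subst hblank
    unfold blocksStep
    simp only [ne_eq, not_true_eq_false, if_false]
    rcases hdisj with ⟨hk, hout⟩ | ⟨hk, hks, hout⟩ | ⟨hk, hks, hout⟩
    · -- open kept block: A appends "", B closes the block
      have hcne : cur ≠ [] := by
        intro hc; rw [hc] at hk; exact hk rfl
      rw [if_pos hcne]
      have hflatne : out ≠ [] := by
        obtain ⟨p, hp⟩ := intercalate_last_append ([""] : List String) (keptBlocks bs) (cur.filter keepB)
        rw [hout, flat, hp]
        intro hnil
        rcases List.append_eq_nil_iff.mp hnil with ⟨_, h2⟩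
        exact hk h2
      have hlast : out.getLast? ≠ some "" := by
        rw [hout, getLast?_flat_append _ _ hk]
        cases hfc : (cur.filter keepB).getLast? with
        | none => simp
        | some l =>
          have hlm : l ∈ cur.filter keepB := List.mem_of_getLast? hfc
          have : GoodStr l := hcur l (List.mem_of_mem_filter hlm)
          intro he
          exact this.1 (Option.some.inj he)
      unfold stepA
      rw [if_pos rfl, if_pos ⟨hflatne, hlast⟩]
      refine ⟨?_, by simp, Or.inr (Or.inr ⟨by simp, ?_, ?_⟩)⟩
      · intro b hb
        rcases List.mem_append.mp hb with h | h
        · exact hbs b h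
        · rw [List.mem_singleton] at h; subst h; exact hcur
      · rw [keptBlocks_append_singleton, if_pos hk]; simp
      · rw [hout, keptBlocks_append_singleton, if_pos hk]
    · -- nothing emitted yet: A's out stays []
      have hstep : stepA out "" = out := by
        unfold stepA; rw [if_pos rfl, if_neg (by rw [hout]; simp)]
      rw [hstep]
      by_cases hcne : cur ≠ []
      · rw [if_pos hcne]
        refine ⟨?_, by simp, Or.inr (Or.inl ⟨by simp, ?_, hout⟩)⟩
        · intro b hb
          rcases List.mem_append.mp hb with h | h
          · exact hbs b h
          · rw [List.mem_singleton] at h; subst h; exact hcur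
        · rw [keptBlocks_append_singleton, if_neg (by simpa using hk), hks]; simp
      · rw [if_neg hcne]
        exact ⟨hbs, hcur, Or.inr (Or.inl ⟨hk, hks, hout⟩)⟩
    · -- pending blank already present: A's out stays
      have hstep : stepA out "" = out := by
        unfold stepA
        rw [if_pos rfl, if_neg]
        intro hcond
        exact hcond.2 (by rw [hout, List.getLast?_append]; simp)
      rw [hstep]
      by_cases hcne : cur ≠ []
      · rw [if_pos hcne]
        refine ⟨?_, by simp, Or.inr (Or.inr ⟨by simp, ?_, ?_⟩)⟩
        · intro b hb
          rcases List.mem_append.mp hb with h | h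
          · exact hbs b h
          · rw [List.mem_singleton] at h; subst h; exact hcur
        · rw [keptBlocks_append_singleton, if_neg (by simpa using hk)]; simpa using hks
        · rw [keptBlocks_append_singleton, if_neg (by simpa using hk)]; simpa using hout
      · rw [if_neg hcne]
        exact ⟨hbs, hcur, Or.inr (Or.inr ⟨hk, hks, hout⟩)⟩
  · -- non-blank line: B extends the current run
    have hgood : GoodStr ln := hg hblank
    unfold blocksStep
    rw [if_pos hblank]
    have hcur' : ∀ l ∈ cur ++ [ln], GoodStr l := by
      intro l hl
      rcases List.mem_append.mp hl with h | h
      · exact hcur l h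
      · rw [List.mem_singleton] at h; subst h; exact hgood
    by_cases hkeep : keepB ln = true
    · rw [show stepA out ln = out ++ [ln] from stepA_of_kept ln hblank hkeep out]
      have hfilt : (cur ++ [ln]).filter keepB = cur.filter keepB ++ [ln] := by
        rw [List.filter_append]; simp [hkeep]
      rcases hdisj with ⟨hk, hout⟩ | ⟨hk, hks, hout⟩ | ⟨hk, hks, hout⟩
      · refine ⟨hbs, hcur', Or.inl ⟨by simp [hfilt], ?_⟩⟩
        rw [hout, hfilt, flat_append_singleton, flat_append_singleton]
        by_cases hks : keptBlocks bs = [] <;> simp [hks]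
      · refine ⟨hbs, hcur', Or.inl ⟨by simp [hfilt], ?_⟩⟩
        rw [hout, hfilt, hk, flat_append_singleton, hks]
        simp [flat, List.intercalate]
      · refine ⟨hbs, hcur', Or.inl ⟨by simp [hfilt], ?_⟩⟩
        rw [hout, hfilt, hk, flat_append_singleton, if_neg hks]
        simp
    · rw [Bool.not_eq_true] at hkeep
      rw [stepA_of_dropped ln hblank hkeep out]
      have hfilt : (cur ++ [ln]).filter keepB = cur.filter keepB := by
        rw [List.filter_append]; simp [hkeep]
      refine ⟨hbs, hcur', ?_⟩
      rw [hfilt]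
      exact hdisj

theorem fold_inv (L : List String) (hL : ∀ l ∈ L, l ≠ "" → GoodStr l)
    (out : List String) (bs : List (List String)) (cur : List String)
    (h : RelState out bs cur) :
    RelState (L.foldl stepA out) ((L.foldl blocksStep (bs, cur)).1)
      ((L.foldl blocksStep (bs, cur)).2) := by
  induction L generalizing out bs cur with
  | nil => exact h
  | cons a L ih =>
    have h' := step_inv a (hL a (List.mem_cons_self ..)) out bs cur h
    simp only [List.foldl_cons]
    rw [show blocksStep (bs, cur) a = ((blocksStep (bs, cur) a).1, (blocksStep (bs, cur) a).2) from rfl]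
    exact ih (fun l hl h0 => hL l (List.mem_cons_of_mem _ hl) h0) _ _ _ h' 

-- B's filterMap is mapping join over the kept blocks
theorem filterMap_keptBlocks (bs : List (List String)) :
    bs.filterMap (fun blk =>
        let kept := blk.filter keepB
        if kept ≠ [] then some (PySem.Str.join "\n" kept) else none)
      = (keptBlocks bs).map (fun b => PySem.Str.join "\n" b) := by
  induction bs with
  | nil => rfl
  | cons b bs ih =>
    rw [List.filterMap_cons]
    unfold keptBlocks
    simp only [List.map_cons, List.filter_cons]
    by_cases h : b.filter keepB = []
    · simp only [h, List.isEmpty_nil]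
      simpa [h] using ih
    · simp only [List.isEmpty_eq_false_iff.mpr h]
      simpa [h] using congrArg (List.cons (PySem.Str.join "\n" (b.filter keepB))) ih

-- map distributes over intercalate
theorem map_intercalate {α β : Type} (f : α → β) (sep : List α) (L : List (List α)) :
    (List.intercalate sep L).map f =
      List.intercalate (sep.map f) (L.map (List.map f)) := by
  induction L with
  | nil => simp [List.intercalate]
  | cons b L' ih =>
    cases L' with
    | nil => simp [List.intercalate]
    | cons c t =>
      rw [show List.intercalate sep (b :: c :: t) = b ++ sep ++ List.intercalate sep (c :: t)
            from by simp [List.intercalate],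
        List.map_append, List.map_append, ih,
        show List.intercalate (sep.map f) ((b :: c :: t).map (List.map f)) =
            b.map f ++ sep.map f ++ List.intercalate (sep.map f) ((c :: t).map (List.map f))
          from by simp [List.intercalate]]

-- the Chars-level block/paragraph join identity
theorem join_flat_chars (K : List (List (List Char))) (hb : ∀ b ∈ K, b ≠ []) :
    List.intercalate ['\n'] (List.intercalate [[]] K)
      = List.intercalate ['\n', '\n'] (K.map (List.intercalate ['\n'])) := by
  induction K with
  | nil => simp [List.intercalate]
  | cons b K' ih =>
    cases K' with
    | nil => simp [List.intercalate]
    | cons b2 K'' =>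
      have hbne : b ≠ [] := hb b (by simp)
      have hRne : List.intercalate [[]] (b2 :: K'') ≠ [] := by
        obtain ⟨r, hr⟩ := intercalate_head_append [[]] b2 K''
        rw [hr]
        intro hnil
        exact hb b2 (by simp) (List.append_eq_nil_iff.mp hnil).1
      rw [show ((b :: b2 :: K'') : List (List (List Char))) = [b] ++ (b2 :: K'') from rfl,
        intercalate_append_ne [[]] [b] (b2 :: K'') (by simp) (by simp),
        show List.intercalate [[]] [b] = b from by simp [List.intercalate]]
      rw [show b ++ [[]] ++ List.intercalate [[]] (b2 :: K'') =
            b ++ ([[]] ++ List.intercalate [[]] (b2 :: K'')) from by simp,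
        intercalate_append_ne ['\n'] b _ hbne (by simp),
        intercalate_append_ne ['\n'] [[]] _ (by simp) hRne,
        show List.intercalate ['\n'] [[]] = [] from by simp [List.intercalate]]
      rw [ih (fun x hx => hb x (by simp [hx]))]
      rw [List.map_append,
        intercalate_append_ne ['\n', '\n'] (List.map (List.intercalate ['\n']) [b]) _
          (by simp) (by simp)]
      simp [List.intercalate]

-- join "\n" over the flattened blocks = join "\n\n" over the per-block joins
theorem join_flat (K : List (List String)) (hb : ∀ b ∈ K, b ≠ []) :
    PySem.Str.join "\n" (flat K) =
      PySem.Str.join "\n\n" (K.map (fun b => PySem.Str.join "\n" b)) := by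
  unfold PySem.Str.join PySem.Chars.join flat
  refine congrArg String.ofList ?_
  rw [show ("\n" : String).toList = ['\n'] from rfl,
    show ("\n\n" : String).toList = ['\n', '\n'] from rfl,
    map_intercalate String.toList [""] K,
    show (([""] : List String).map String.toList) = [[]] from rfl]
  rw [join_flat_chars (K.map (List.map String.toList)) ?_]
  · congr 1
    simp [List.map_map, Function.comp_def]
  · intro b hbm
    rw [List.mem_map] at hbm
    obtain ⟨b0, hb0, rfl⟩ := hbm
    simpa using hb b0 hb0


-- dropWhile isspace yields [] or a list with a non-space head
theorem dropWhile_isspace_cases (cs : List Char) :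
    List.dropWhile PySem.Chars.isspace cs = [] ∨
      ∃ c t, List.dropWhile PySem.Chars.isspace cs = c :: t ∧ PySem.Chars.isspace c = false := by
  induction cs with
  | nil => exact Or.inl rfl
  | cons c t ih =>
    rw [List.dropWhile_cons]
    by_cases h : PySem.Chars.isspace c = true
    · simpa [h] using ih
    · rw [Bool.not_eq_true] at h
      exact Or.inr ⟨c, t, by simp [h], h⟩

-- a strip-invariant list is both lstrip- and rstrip-invariant
theorem strip_eq_self_split (cs : List Char) (h : PySem.Chars.strip cs = cs) :
    PySem.Chars.lstrip cs = cs ∧ PySem.Chars.rstrip cs = cs := by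
  have hsuf : PySem.Chars.lstrip cs <:+ cs := List.dropWhile_suffix _
  have hlen1 : (PySem.Chars.rstrip (PySem.Chars.lstrip cs)).length ≤ (PySem.Chars.lstrip cs).length := by
    unfold PySem.Chars.rstrip
    calc (List.dropWhile PySem.Chars.isspace (PySem.Chars.lstrip cs).reverse).reverse.length
        = (List.dropWhile PySem.Chars.isspace (PySem.Chars.lstrip cs).reverse).length := List.length_reverse ..
      _ ≤ (PySem.Chars.lstrip cs).reverse.length := List.length_dropWhile_le ..
      _ = (PySem.Chars.lstrip cs).length := List.length_reverse ..
  have hlen2 : cs.length ≤ (PySem.Chars.lstrip cs).length := by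
    have := congrArg List.length h
    unfold PySem.Chars.strip at this
    omega
  have hl : PySem.Chars.lstrip cs = cs := hsuf.eq_of_length (le_antisymm (hsuf.length_le) hlen2)
  refine ⟨hl, ?_⟩
  unfold PySem.Chars.strip at h
  rwa [hl] at h

-- stripping is idempotent
theorem strip_idem (cs : List Char) :
    PySem.Chars.strip (PySem.Chars.strip cs) = PySem.Chars.strip cs := by
  have hR : PySem.Chars.rstrip (PySem.Chars.strip cs) = PySem.Chars.strip cs := by
    unfold PySem.Chars.strip PySem.Chars.rstrip
    rcases dropWhile_isspace_cases (PySem.Chars.lstrip cs).reverse with h | ⟨c, t, h, hc⟩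
    · rw [h]; simp
    · rw [h]
      rw [List.reverse_reverse, List.dropWhile_cons, hc]
      simp
  have hL : PySem.Chars.lstrip (PySem.Chars.strip cs) = PySem.Chars.strip cs := by
    rcases dropWhile_isspace_cases cs with h | ⟨c, t, h, hc⟩
    · unfold PySem.Chars.strip PySem.Chars.lstrip PySem.Chars.rstrip at *
      rw [h]
      simp
    · -- strip cs is a prefix of lstrip cs = c :: t with non-space c
      have hpre : PySem.Chars.strip cs <+: PySem.Chars.lstrip cs := by
        unfold PySem.Chars.strip PySem.Chars.rstrip
        refine List.reverse_suffix.mp ?_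
        rw [List.reverse_reverse]
        exact List.dropWhile_suffix _
      unfold PySem.Chars.lstrip at hpre
      rw [h] at hpre
      obtain ⟨z, hz⟩ := hpre
      cases he : PySem.Chars.strip cs with
      | nil => simp [PySem.Chars.lstrip]
      | cons a u =>
        rw [he] at hz
        have ha : a = c := by
          have := congrArg List.head? hz
          simpa using this
        unfold PySem.Chars.lstrip
        rw [List.dropWhile_cons, ha, hc]
        simp
  calc PySem.Chars.strip (PySem.Chars.strip cs)
      = PySem.Chars.rstrip (PySem.Chars.strip cs) := by rw [PySem.Chars.strip, hL]
    _ = PySem.Chars.strip cs := hR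

-- lstrip is a no-op past a non-empty lstrip-invariant prefix
theorem lstrip_of_prefix (l r : List Char) (hl : l ≠ [])
    (hs : PySem.Chars.lstrip l = l) : PySem.Chars.lstrip (l ++ r) = l ++ r := by
  cases l with
  | nil => exact absurd rfl hl
  | cons c t =>
    have hc : PySem.Chars.isspace c = false := by
      by_contra hcc
      rw [Bool.not_eq_false] at hcc
      unfold PySem.Chars.lstrip at hs
      rw [List.dropWhile_cons, hcc] at hs
      have h1 := congrArg List.length hs
      simp at h1
      have h2 := List.length_dropWhile_le PySem.Chars.isspace t
      omega
    unfold PySem.Chars.lstrip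
    rw [List.cons_append, List.dropWhile_cons, hc]
    simp

-- rstrip is a no-op before a non-empty rstrip-invariant suffix
theorem rstrip_of_suffix (l r : List Char) (hr : r ≠ [])
    (hs : PySem.Chars.rstrip r = r) : PySem.Chars.rstrip (l ++ r) = l ++ r := by
  have hs' : PySem.Chars.lstrip r.reverse = r.reverse := by
    unfold PySem.Chars.rstrip at hs
    unfold PySem.Chars.lstrip
    calc List.dropWhile PySem.Chars.isspace r.reverse
        = (List.dropWhile PySem.Chars.isspace r.reverse).reverse.reverse := by
          rw [List.reverse_reverse]
      _ = r.reverse := by rw [hs]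
  have := lstrip_of_prefix r.reverse l.reverse (by simpa using hr) hs'
  unfold PySem.Chars.rstrip
  unfold PySem.Chars.lstrip at this
  rw [List.reverse_append, this, List.reverse_append, List.reverse_reverse, List.reverse_reverse]


-- rstrip eats one trailing newline
theorem rstrip_append_newline (x : List Char) :
    PySem.Chars.rstrip (x ++ ['\n']) = PySem.Chars.rstrip x := by
  unfold PySem.Chars.rstrip
  rw [List.reverse_append]
  rw [show (['\n'] : List Char).reverse ++ x.reverse = '\n' :: x.reverse from by simp]
  rw [List.dropWhile_cons]
  simp [show PySem.Chars.isspace '\n' = true from by decide]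

-- strip eats one trailing newline
theorem strip_append_newline (x : List Char) :
    PySem.Chars.strip (x ++ ['\n']) = PySem.Chars.strip x := by
  unfold PySem.Chars.strip PySem.Chars.lstrip
  rw [List.dropWhile_append]
  by_cases h : (List.dropWhile PySem.Chars.isspace x).isEmpty
  · rw [if_pos h]
    rw [List.isEmpty_iff] at h
    rw [h]
    rw [show List.dropWhile PySem.Chars.isspace ['\n'] = [] from by decide]
  · rw [if_neg h]
    exact rstrip_append_newline _

-- a "\n"-join whose first and last entries are good lines is strip-invariant
theorem strip_join_eq_self (out : List String) (l0 l1 : String) (pre suf : List String)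
    (h0 : out = l0 :: suf) (h1 : out = pre ++ [l1]) (hg0 : GoodStr l0) (hg1 : GoodStr l1) :
    PySem.Str.strip (PySem.Str.join "\n" out) = PySem.Str.join "\n" out := by
  unfold PySem.Str.strip PySem.Str.join PySem.Chars.join
  refine congrArg String.ofList ?_
  rw [String.toList_ofList]
  have hne0 : l0.toList ≠ [] := by
    rw [ne_eq, String.toList_eq_nil_iff]
    exact hg0.1
  have hne1 : l1.toList ≠ [] := by
    rw [ne_eq, String.toList_eq_nil_iff]
    exact hg1.1
  obtain ⟨hls0, _⟩ := strip_eq_self_split l0.toList hg0.2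
  obtain ⟨_, hrs1⟩ := strip_eq_self_split l1.toList hg1.2
  obtain ⟨r2, hr2⟩ :
      ∃ r2, List.intercalate ("\n".toList) (out.map String.toList) = l0.toList ++ r2 := by
    rw [h0, List.map_cons]
    exact intercalate_head_append _ _ _
  obtain ⟨q2, hq2⟩ :
      ∃ q2, List.intercalate ("\n".toList) (out.map String.toList) = q2 ++ l1.toList := by
    rw [h1, List.map_append, List.map_singleton]
    exact intercalate_last_append _ _ _
  have hL : PySem.Chars.lstrip (List.intercalate ("\n".toList) (out.map String.toList))
      = List.intercalate ("\n".toList) (out.map String.toList) := by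
    rw [hr2]
    exact lstrip_of_prefix _ _ hne0 hls0
  have hR : PySem.Chars.rstrip (List.intercalate ("\n".toList) (out.map String.toList))
      = List.intercalate ("\n".toList) (out.map String.toList) := by
    rw [hq2]
    exact rstrip_of_suffix _ _ hne1 hrs1
  unfold PySem.Chars.strip
  rw [hL, hR]

-- strip is a no-op on the join of good lines
theorem strip_join_flat (K : List (List String)) (hb : ∀ b ∈ K, b ≠ [])
    (hg : ∀ b ∈ K, ∀ l ∈ b, GoodStr l) :
    PySem.Str.strip (PySem.Str.join "\n" (flat K)) = PySem.Str.join "\n" (flat K) := by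
  cases K with
  | nil => rfl
  | cons b K' =>
    have hbne : b ≠ [] := hb _ (by simp)
    obtain ⟨l0, b', rfl⟩ : ∃ l0 b', b = l0 :: b' := by
      cases b with
      | nil => exact absurd rfl hbne
      | cons x t => exact ⟨x, t, rfl⟩
    obtain ⟨r, hr⟩ := intercalate_head_append ([""] : List String) (l0 :: b') K'
    rcases List.eq_nil_or_concat ((l0 :: b') :: K') with hnil | ⟨K'', bl, hKc⟩
    · simp at hnil
    · rw [List.concat_eq_append] at hKc
      have hblne : bl ≠ [] := hb bl (by rw [hKc]; simp)
      obtain ⟨b'', l1, hbl⟩ : ∃ b'' l1, bl = b'' ++ [l1] := by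
        rcases List.eq_nil_or_concat bl with h | ⟨b'', l1, h⟩
        · exact absurd h hblne
        · exact ⟨b'', l1, by rw [h, List.concat_eq_append]⟩
      obtain ⟨p, hp⟩ := intercalate_last_append ([""] : List String) K'' bl
      refine strip_join_eq_self (flat ((l0 :: b') :: K')) l0 l1 (p ++ b'') (b' ++ r) ?_ ?_ ?_ ?_
      · rw [flat, hr]; rfl
      · rw [flat, hKc, hp, hbl]; simp
      · exact hg (l0 :: b') (by simp) l0 (by simp)
      · refine hg bl (by rw [hKc]; simp) l1 (by rw [hbl]; simp)

-- strip eats a trailing blank entry of the join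
theorem strip_join_append_blank (l : List String) :
    PySem.Str.strip (PySem.Str.join "\n" (l ++ [""]))
      = PySem.Str.strip (PySem.Str.join "\n" l) := by
  cases l with
  | nil => rfl
  | cons x t =>
    unfold PySem.Str.strip PySem.Str.join PySem.Chars.join
    refine congrArg String.ofList ?_
    rw [show ("\n" : String).toList = ['\n'] from rfl]
    simp only [String.toList_ofList, List.map_append, List.map_singleton]
    rw [intercalate_append_ne (['\n'] : List Char) ((x :: t).map String.toList) _
      (by simp) (by simp)]
    rw [show List.intercalate (['\n'] : List Char) [("" : String).toList] = ([] : List Char)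
      from by simp [List.intercalate]]
    rw [List.append_nil]
    exact strip_append_newline _

-- ===== VERDICT (by name: the statement is the Claim_ definition above) =====
theorem cleanup_lines_spec : Claim_equal_cleanup_lines := by
  intro text _
  unfold Spec_cleanup_lines cleanup_lines cleanup_lines_alt
  show PySem.Str.strip (PySem.Str.join "\n"
      (((PySem.Str.splitlines (if text = "" then "" else text)).map PySem.Str.strip).foldl stepA []))
    = PySem.Str.join "\n\n"
      ((blocksOf ((PySem.Str.splitlines (if text = "" then "" else text)).map PySem.Str.strip)).filterMap
        (fun blk =>
          let kept := blk.filter keepB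
          if kept ≠ [] then some (PySem.Str.join "\n" kept) else none))
  have hLgood : ∀ l ∈ ((PySem.Str.splitlines (if text = "" then "" else text)).map PySem.Str.strip),
      l ≠ "" → GoodStr l := by
    intro l hl hne
    rw [List.mem_map] at hl
    obtain ⟨s, hs, rfl⟩ := hl
    exact ⟨hne, by simp [strip_idem]⟩
  generalize hgen : ((PySem.Str.splitlines (if text = "" then "" else text)).map PySem.Str.strip) = L
  rw [hgen] at hLgood
  obtain ⟨hbs, hcur, hdisj⟩ :=
    fold_inv L hLgood [] [] [] ⟨by simp, by simp, Or.inr (Or.inl ⟨rfl, rfl, rfl⟩)⟩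
  rw [filterMap_keptBlocks]
  have hBL : blocksOf L = (L.foldl blocksStep ([], [])).1 ++
      (if (L.foldl blocksStep ([], [])).2 ≠ [] then [(L.foldl blocksStep ([], [])).2] else []) := by
    unfold blocksOf
    by_cases h : (L.foldl blocksStep ([], [])).2 ≠ [] <;> simp [h]
  have hgoodB : ∀ b ∈ blocksOf L, ∀ l ∈ b, GoodStr l := by
    rw [hBL]
    intro b hbm l hlm
    rcases List.mem_append.mp hbm with h | h
    · exact hbs b h l hlm
    · by_cases h2 : (L.foldl blocksStep ([], [])).2 ≠ []
      · rw [if_pos h2, List.mem_singleton] at h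
        subst h
        exact hcur l hlm
      · rw [if_neg h2] at h
        simp at h
  have hgoodK : ∀ b ∈ keptBlocks (blocksOf L), b ≠ [] ∧ ∀ l ∈ b, GoodStr l :=
    fun b hb => good_of_mem_keptBlocks _ hgoodB b hb
  rcases hdisj with ⟨hk, hout⟩ | ⟨hk, hks, hout⟩ | ⟨hk, hks, hout⟩
  · have hcne : (L.foldl blocksStep ([], [])).2 ≠ [] := by
      intro h
      rw [h] at hk
      exact hk rfl
    have hKeq : keptBlocks (blocksOf L) = keptBlocks (L.foldl blocksStep ([], [])).1 ++
        [(L.foldl blocksStep ([], [])).2.filter keepB] := by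
      rw [hBL, if_pos hcne, keptBlocks_append_singleton, if_pos hk]
    rw [hout, ← hKeq,
      strip_join_flat _ (fun b hb => (hgoodK b hb).1) (fun b hb => (hgoodK b hb).2)]
    exact join_flat _ (fun b hb => (hgoodK b hb).1)
  · have hKeq : keptBlocks (blocksOf L) = [] := by
      rw [hBL]
      by_cases h2 : (L.foldl blocksStep ([], [])).2 ≠ []
      · rw [if_pos h2, keptBlocks_append_singleton, if_neg (by simpa using hk), hks]
        rfl
      · rw [if_neg h2, List.append_nil, hks]
    rw [hout, hKeq]
    rfl
  · have hKeq : keptBlocks (blocksOf L) = keptBlocks (L.foldl blocksStep ([], [])).1 := by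
      rw [hBL]
      by_cases h2 : (L.foldl blocksStep ([], [])).2 ≠ []
      · rw [if_pos h2, keptBlocks_append_singleton, if_neg (by simpa using hk)]
        simp
      · rw [if_neg h2]
        simp
    rw [hout, ← hKeq, strip_join_append_blank,
      strip_join_flat _ (fun b hb => (hgoodK b hb).1) (fun b hb => (hgoodK b hb).2)]
    exact join_flat _ (fun b hb => (hgoodK b hb).1)
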